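-- pv_equiv track=rewrite | github.com/Mayjoy-jiao/smoketest | testCase/user/Test_click_lower_limit_01.py | get_5min_section
-- ===== SOURCE A (Python) =====
-- def get_5min_section(n):
--     """
--     获取5分钟倍数的时间段
--     :param n: 分钟
--     :return: 返回时间段
--     """
--     star_end__min_time = []
--     for i in range(0, 12):
--         min = range(5 * i, 5 * (i + 1))
--         if n in min:
--             start = n - (n - 5 * i)
--             end = n + (5 * (i + 1) - n)
--             if end == 60:
--                 end=59
--                 star_end__min_time.append(start)
--                 star_end__min_time.append(end)
--             else:
--                 star_end__min_time.append(start)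
--                 star_end__min_time.append(end)
--
--             return star_end__min_time
-- ===== SOURCE B (Python) =====
-- def get_5min_section(n):
--     """Closed-form: compute the 5-minute block directly instead of scanning 12 ranges."""
--     if n in range(0, 60):
--         start = n - n % 5
--         end = start + 5
--         if end == 60:
--             end = 59
--         return [start, end]
-- ===== Notes on version B (the rewrite author's own statement) =====
-- stated objective: simpler
-- what changed: Replaces the 12-iteration scan over range(5i,5(i+1)) blocks with a single closed-form computation start = n - n%5, end = start+5 (60 clamped to 59).
-- outside the precondition, e.g. on get_5min_section(60): A returns None, B returns None; on get_5min_section(-1): A returns None, B returns None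
import Mathlib
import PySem

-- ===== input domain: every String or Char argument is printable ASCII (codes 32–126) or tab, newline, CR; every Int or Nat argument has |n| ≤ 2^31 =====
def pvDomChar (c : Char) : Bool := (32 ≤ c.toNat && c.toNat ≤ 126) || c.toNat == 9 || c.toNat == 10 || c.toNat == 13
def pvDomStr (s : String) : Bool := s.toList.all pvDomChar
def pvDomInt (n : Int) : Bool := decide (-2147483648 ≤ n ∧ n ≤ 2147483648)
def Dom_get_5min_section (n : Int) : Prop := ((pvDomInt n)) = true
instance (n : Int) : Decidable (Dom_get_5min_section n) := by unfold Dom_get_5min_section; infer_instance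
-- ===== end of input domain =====

-- B replaces A's 12-iteration scan with a single closed-form computation (objective: simpler).

-- ===== PORT A =====
-- the for-loop over i in range(0,12) with an early return; [] stands for Python's
-- fall-through None, which Pre_ excludes
def get5Loop (n : Int) : Nat → Nat → List Int
  | 0, _ => []
  | rem + 1, i =>
    if 5 * (i : Int) ≤ n ∧ n < 5 * ((i : Int) + 1) then
      let start := n - (n - 5 * (i : Int))
      let e := n + (5 * ((i : Int) + 1) - n)
      if e = 60 then [start, 59] else [start, e]
    else get5Loop n rem (i + 1)

def get_5min_section (n : Int) : List Int := get5Loop n 12 0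

-- ===== PORT B =====
def get_5min_section_alt (n : Int) : List Int :=
  if 0 ≤ n ∧ n < 60 then
    let start := n - PySem.Int.mod n 5
    let e := start + 5
    if e = 60 then [start, 59] else [start, e]
  else []

-- ===== PRECONDITION & SPEC =====
-- Pre_ excludes n outside [0, 60): there A falls off the loop and returns None,
-- which is not a value of the declared List Int type.
def Pre_get_5min_section (n : Int) : Prop := 0 ≤ n ∧ n < 60
instance (n : Int) : Decidable (Pre_get_5min_section n) := by unfold Pre_get_5min_section; infer_instance
def pvWitness_get_5min_section : Int := (7)

def Spec_get_5min_section (n : Int) (out : List Int) : Prop := out = get_5min_section_alt n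
instance (n : Int) (out : List Int) : Decidable (Spec_get_5min_section n out) := by unfold Spec_get_5min_section; infer_instance

-- ===== CLAIM (what is proved, stated in full; the proofs are below) =====
def Claim_equal_get_5min_section : Prop := ∀ (n : Int), Dom_get_5min_section n → Pre_get_5min_section n → Spec_get_5min_section n (get_5min_section n)

-- ===== LEMMAS AND PROOFS =====

-- ===== VERDICT (by name: the statement is the Claim_ definition above) =====
theorem get_5min_section_spec : Claim_equal_get_5min_section := by
  intro n _ hpre
  unfold Spec_get_5min_section
  obtain ⟨h0, h60⟩ := hpre
  interval_cases n <;> decide
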